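-- pv_equiv track=rewrite | github.com/ganeshutah/FPChecker | tracing_tool/fpchecker.py | getCodeFileName
-- ===== SOURCE A (Python) =====
-- CUDA_EXTENSION = ['.cu', '.cuda'] + ['.C', '.cc', '.cpp', '.CPP', '.c++', '.cp', '.cxx']
--
-- def getCodeFileName(line):
--   tokens = line.split()
--   fileName = None
--   for t in tokens:
--     for ext in CUDA_EXTENSION:
--       if t.endswith(ext):
--         fileName = t
--   return fileName
-- ===== SOURCE B (Python) =====
-- CUDA_EXTENSION = ['.cu', '.cuda'] + ['.C', '.cc', '.cpp', '.CPP', '.c++', '.cp', '.cxx']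
--
-- def getCodeFileName(line):
--   # scan the tokens backwards and stop at the first match: equals A's last forward match
--   for t in reversed(line.split()):
--     if any(t.endswith(ext) for ext in CUDA_EXTENSION):
--       return t
--   return None
-- ===== Notes on version B (the rewrite author's own statement) =====
-- stated objective: alternative
-- what changed: B scans the tokens in reverse and returns at the first token matching an extension (early exit), instead of A's full forward scan that keeps overwriting the result.
import Mathlib
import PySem

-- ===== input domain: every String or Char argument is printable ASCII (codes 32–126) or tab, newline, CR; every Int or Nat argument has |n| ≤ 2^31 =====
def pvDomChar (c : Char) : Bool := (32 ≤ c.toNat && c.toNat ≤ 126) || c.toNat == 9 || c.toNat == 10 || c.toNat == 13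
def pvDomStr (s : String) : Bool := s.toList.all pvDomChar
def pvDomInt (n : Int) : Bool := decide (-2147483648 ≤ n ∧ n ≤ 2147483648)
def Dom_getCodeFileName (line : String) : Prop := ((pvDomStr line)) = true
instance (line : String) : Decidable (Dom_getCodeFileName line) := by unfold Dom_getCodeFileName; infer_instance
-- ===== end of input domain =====

-- B scans the tokens in reverse and returns at the first match (early exit); same return value as A's overwrite-to-the-end scan.

-- ===== PORT A =====
def cudaExtension : List String :=
  [".cu", ".cuda"] ++ [".C", ".cc", ".cpp", ".CPP", ".c++", ".cp", ".cxx"]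

def getCodeFileName (line : String) : Option String :=
  (PySem.Str.split₀ line).foldl
    (fun fileName t =>
      cudaExtension.foldl
        (fun fn ext => if PySem.Str.endswith t ext then some t else fn) fileName)
    none

-- ===== PORT B =====
def matchesExt (t : String) : Bool :=
  cudaExtension.any (fun ext => PySem.Str.endswith t ext)

def getCodeFileName_alt (line : String) : Option String :=
  (PySem.Str.split₀ line).reverse.find? matchesExt

-- ===== PRECONDITION & SPEC =====
def Spec_getCodeFileName (line : String) (out : Option String) : Prop := out = getCodeFileName_alt line
instance (line : String) (out : Option String) : Decidable (Spec_getCodeFileName line out) := by unfold Spec_getCodeFileName; infer_instance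

-- ===== CLAIM (what is proved, stated in full; the proofs are below) =====
def Claim_equal_getCodeFileName : Prop := ∀ (line : String), Dom_getCodeFileName line → Spec_getCodeFileName line (getCodeFileName line)

-- ===== LEMMAS AND PROOFS =====

-- A's inner loop over the extension list sets the accumulator to `some t` iff some extension matches.
theorem inner_foldl_eq (t : String) (exts : List String) (fn : Option String) :
    exts.foldl (fun fn ext => if PySem.Str.endswith t ext then some t else fn) fn
      = if exts.any (fun e => PySem.Str.endswith t e) then some t else fn := by
  induction exts generalizing fn with
  | nil => simp
  | cons e rest ih =>
    simp only [List.foldl_cons, List.any_cons, ih]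
    split_ifs <;> simp_all
    rename_i hall hne hex
    obtain ⟨x, hx, hxt⟩ := hex
    exact absurd hxt (by simp [hall x hx])

-- A's outer loop equals "first match of the reversed list, else the initial accumulator".
theorem outer_foldl_eq (tokens : List String) (acc : Option String) :
    tokens.foldl (fun acc t => if matchesExt t then some t else acc) acc
      = (tokens.reverse.find? matchesExt).or acc := by
  induction tokens generalizing acc with
  | nil => simp
  | cons t ts ih =>
    simp only [List.foldl_cons, List.reverse_cons, List.find?_append, ih]
    by_cases h : matchesExt t = true <;>
      cases hf : ts.reverse.find? matchesExt <;> simp [h, Option.or]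

-- ===== VERDICT (by name: the statement is the Claim_ definition above) =====
theorem getCodeFileName_spec : Claim_equal_getCodeFileName := by
  intro line _
  unfold Spec_getCodeFileName getCodeFileName getCodeFileName_alt
  have h : ∀ (fn : Option String) (t : String),
      cudaExtension.foldl (fun fn ext => if PySem.Str.endswith t ext then some t else fn) fn
        = if matchesExt t then some t else fn := by
    intro fn t; rw [inner_foldl_eq]; rfl
  calc (PySem.Str.split₀ line).foldl
        (fun fileName t => cudaExtension.foldl
          (fun fn ext => if PySem.Str.endswith t ext then some t else fn) fileName) none
      = (PySem.Str.split₀ line).foldl (fun acc t => if matchesExt t then some t else acc) none := by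
        apply PySem.List.foldl_congr_mem; intro acc t _; exact h acc t
    _ = ((PySem.Str.split₀ line).reverse.find? matchesExt).or none := outer_foldl_eq _ _
    _ = (PySem.Str.split₀ line).reverse.find? matchesExt := by cases hf : (PySem.Str.split₀ line).reverse.find? matchesExt <;> simp
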